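-- pv_equiv track=rewrite | github.com/sakagami0615/library-snippet-registration | snippet/src/lib_loader/check.py | check_library_code_block
-- ===== SOURCE A (Python) =====
-- def check_library_code_block(lines: list[str], code_block_begin: str, code_block_end: str) -> bool:
--     """ライブラリコードブロックの開始・終了マークが正しく配置されているかチェックする
--
--     コードブロックの開始マークと終了マークが適切にネストされているかを検証します。
--     不正なネストや順序の誤りを検出します。
--
--     Args:
--         lines (list[str]): チェック対象のコード行のリスト
--         code_block_begin (str): コードブロック開始マーク (ex: "lib:begin")
--         code_block_end (str): コードブロック終了マーク (ex: "lib:end")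
--
--     Returns:
--         bool: コードブロックが正しく配置されている場合True、それ以外はFalse
--
--     Note:
--         - カウンタが負の値になる場合: 終了マークが開始マークより先に出現
--         - カウンタが1を超える場合: コードブロックが入れ子になっている
--         - 最終的にカウンタが0でない場合: 開始と終了のペアが一致しない
--     """
--     counter = 0
--
--     for line in lines:
--         if code_block_begin in line:
--             counter += 1
--         elif code_block_end in line:
--             counter -= 1
--
--         if counter < 0 or counter > 1:
--             return False
--
--     return counter == 0
-- ===== SOURCE B (Python) =====
-- def check_library_code_block(lines: list[str], code_block_begin: str, code_block_end: str) -> bool: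
--     tokens = []
--     for line in lines:
--         if code_block_begin in line:
--             tokens.append('begin')
--         elif code_block_end in line:
--             tokens.append('end')
--     return tokens == ['begin', 'end'] * (len(tokens) // 2)
-- ===== Notes on version B (the rewrite author's own statement) =====
-- stated objective: alternative
-- what changed: Replaces the running nesting counter with a two-pass scheme: first extract the ordered list of begin/end marker tokens, then validate that the list equals ['begin','end'] repeated, i.e. strict begin/end alternation.
import Mathlib
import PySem

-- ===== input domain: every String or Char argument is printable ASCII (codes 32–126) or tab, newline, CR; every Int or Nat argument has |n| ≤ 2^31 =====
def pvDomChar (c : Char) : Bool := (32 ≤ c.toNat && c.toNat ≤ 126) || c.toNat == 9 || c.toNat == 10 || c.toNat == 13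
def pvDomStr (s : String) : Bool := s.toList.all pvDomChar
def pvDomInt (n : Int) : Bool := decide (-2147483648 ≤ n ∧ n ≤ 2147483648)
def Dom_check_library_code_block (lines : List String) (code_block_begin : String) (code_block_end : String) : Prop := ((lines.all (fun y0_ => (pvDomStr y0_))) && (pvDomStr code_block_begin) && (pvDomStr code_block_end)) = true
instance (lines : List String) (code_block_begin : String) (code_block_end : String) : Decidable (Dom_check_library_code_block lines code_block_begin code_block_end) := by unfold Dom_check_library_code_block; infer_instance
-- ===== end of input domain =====

-- B replaces A's running counter with a two-pass scheme (extract marker tokens, then check the list is ['begin','end'] repeated); same cost, alternative decomposition.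


-- ===== PORT A =====
-- A's loop with early return: recursion over the lines carrying the counter.
def checkA_loop (b e : String) (lines : List String) (counter : Int) : Bool :=
  match lines with
  | [] => counter == 0
  | line :: rest =>
    let counter :=
      if PySem.Str.isIn b line then counter + 1
      else if PySem.Str.isIn e line then counter - 1
      else counter
    if counter < 0 || counter > 1 then false
    else checkA_loop b e rest counter

def check_library_code_block (lines : List String) (code_block_begin : String) (code_block_end : String) : Bool :=
  checkA_loop code_block_begin code_block_end lines 0

-- ===== PORT B =====
def check_library_code_block_alt (lines : List String) (code_block_begin : String) (code_block_end : String) : Bool :=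
  let tokens := lines.foldl (fun acc line =>
      if PySem.Str.isIn code_block_begin line then acc ++ ["begin"]
      else if PySem.Str.isIn code_block_end line then acc ++ ["end"]
      else acc) []
  tokens == (List.replicate (tokens.length / 2) ["begin", "end"]).flatten

-- ===== PRECONDITION & SPEC =====
def Spec_check_library_code_block (lines : List String) (code_block_begin : String) (code_block_end : String) (out : Bool) : Prop := out = check_library_code_block_alt lines code_block_begin code_block_end
instance (lines : List String) (code_block_begin : String) (code_block_end : String) (out : Bool) : Decidable (Spec_check_library_code_block lines code_block_begin code_block_end out) := by unfold Spec_check_library_code_block; infer_instance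

-- ===== CLAIM (what is proved, stated in full; the proofs are below) =====
def Claim_equal_check_library_code_block : Prop := ∀ (lines : List String) (code_block_begin : String) (code_block_end : String), Dom_check_library_code_block lines code_block_begin code_block_end → Spec_check_library_code_block lines code_block_begin code_block_end (check_library_code_block lines code_block_begin code_block_end)

-- ===== LEMMAS AND PROOFS =====

-- the token list both programs implicitly walk
def toks (b e : String) (lines : List String) : List String :=
  lines.filterMap (fun line =>
    if PySem.Str.isIn b line then some "begin"
    else if PySem.Str.isIn e line then some "end"
    else none)

-- well-formedness of a token list: strict begin/end alternation, complete pairs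
def wf : List String → Bool
  | [] => true
  | [_] => false
  | x :: y :: r => x == "begin" && y == "end" && wf r

-- well-formedness when a "begin" is already open
def wfE : List String → Bool
  | [] => false
  | y :: r => y == "end" && wf r

lemma wf_begin_cons (ts : List String) : wf ("begin" :: ts) = wfE ts := by
  cases ts <;> simp [wf, wfE]

lemma wf_end_cons (ts : List String) : wf ("end" :: ts) = false := by
  cases ts <;> simp [wf]

lemma checkA_eq_wf (b e : String) (lines : List String) :
    checkA_loop b e lines 0 = wf (toks b e lines) ∧
    checkA_loop b e lines 1 = wfE (toks b e lines) := by
  induction lines with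
  | nil => simp [checkA_loop, toks, wf, wfE]
  | cons l rest ih =>
    by_cases hb : PySem.Chars.isIn b.toList l.toList
    · simp [checkA_loop, toks, hb, wf_begin_cons, wfE, ih.2]
    · by_cases he : PySem.Chars.isIn e.toList l.toList
      · constructor
        · simp [checkA_loop, toks, hb, he, wf_end_cons]
        · simp [checkA_loop, toks, hb, he, wfE, ih.1]
      · simp [checkA_loop, toks, hb, he, ih.1, ih.2]

lemma toks_foldl (b e : String) (lines : List String) (acc : List String) :
    lines.foldl (fun acc line =>
      if PySem.Str.isIn b line then acc ++ ["begin"]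
      else if PySem.Str.isIn e line then acc ++ ["end"]
      else acc) acc = acc ++ toks b e lines := by
  induction lines generalizing acc with
  | nil => simp [toks]
  | cons l rest ih =>
    simp only [PySem.Str.isIn_eq] at ih
    by_cases hb : PySem.Chars.isIn b.toList l.toList <;>
      by_cases he : PySem.Chars.isIn e.toList l.toList <;>
      simp [toks, hb, he, ih]

lemma wf_eq_replicate (ts : List String) :
    wf ts = (ts == (List.replicate (ts.length / 2) ["begin", "end"]).flatten) := by
  induction ts using wf.induct with
  | case1 => simp [wf]
  | case2 x => simp [wf]
  | case3 x y r ih =>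
    have h2 : (r.length + 1 + 1) / 2 = r.length / 2 + 1 := by omega
    simp [wf, ih, h2, List.replicate_succ, Bool.and_assoc]

-- ===== VERDICT (by name: the statement is the Claim_ definition above) =====
theorem check_library_code_block_spec : Claim_equal_check_library_code_block := by
  intro lines b e _
  unfold Spec_check_library_code_block check_library_code_block check_library_code_block_alt
  rw [(checkA_eq_wf b e lines).1, toks_foldl, List.nil_append, wf_eq_replicate]
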